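-- pv_equiv track=rewrite | github.com/skariyania/py-conceptual | src/string_rotation.py | solution
-- ===== SOURCE A (Python) =====
-- def is_same(a: chr, b: chr):
--     """utility function to compare `a` and `b`
--
--     Args:
--         a (chr): input char a
--         b (chr): input char b
--
--     Returns:
--         bool: returns true if both characters are same
--     """
--     return True if a == b else False
--
-- def solution(a):
--     """
--     1. rotate sting - times of length of the string
--     2. compare first and last character
--     3. if same increase counter
--     4. return counter
--     """
--     count = 0
--     for index, elem in enumerate(a):
--         if index + 1 == len(a):
--             next_elem = a[0]
--             is_same(elem, a[0])
--         else:
--             next_elem = a[index + 1]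
--         if is_same(elem, next_elem):
--             count += 1
--     return count
-- ===== SOURCE B (Python) =====
-- def solution(a):
--     """Run-length encode the string, then count adjacent equal pairs as
--     sum(run_length - 1) plus 1 for the wraparound if last char == first."""
--     if not a:
--         return 0
--     runs = []
--     cur = a[0]
--     ln = 1
--     for c in a[1:]:
--         if c == cur:
--             ln += 1
--         else:
--             runs.append(ln)
--             cur = c
--             ln = 1
--     runs.append(ln)
--     return sum(l - 1 for l in runs) + (1 if a[-1] == a[0] else 0)
-- ===== Notes on version B (the rewrite author's own statement) =====
-- stated objective: alternative
-- what changed: A compares each character with its successor by index (with an explicit wraparound branch inside the loop); B run-length-encodes the string, then computes the count arithmetically as sum(run_length - 1) plus 1 if the last character equals the first.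
import Mathlib
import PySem

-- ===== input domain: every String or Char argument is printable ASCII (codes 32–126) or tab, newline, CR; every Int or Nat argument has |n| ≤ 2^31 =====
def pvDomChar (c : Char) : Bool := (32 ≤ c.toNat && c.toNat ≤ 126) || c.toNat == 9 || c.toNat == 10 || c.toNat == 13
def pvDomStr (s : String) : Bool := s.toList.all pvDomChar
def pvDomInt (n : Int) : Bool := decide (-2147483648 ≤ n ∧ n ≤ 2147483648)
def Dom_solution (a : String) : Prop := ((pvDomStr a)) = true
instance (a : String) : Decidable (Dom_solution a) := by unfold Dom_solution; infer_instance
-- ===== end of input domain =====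

-- B replaces A's per-index neighbour comparison by a run-length-encode-then-arithmetic pass
-- (sum of (run length - 1) plus a wraparound check); objective: alternative decomposition.

-- ===== PORT A =====
def is_same (a b : Char) : Bool := if a == b then true else false

def solution (a : String) : Int :=
  let l := a.toList
  (PySem.List.enumerate l).foldl
    (fun count ic =>
      let next_elem : Option Char :=
        if ic.1 + 1 = (l.length : Int) then PySem.List.pyGet? l 0
        else PySem.List.pyGet? l (ic.1 + 1)
      match next_elem with
      | some ne => if is_same ic.2 ne then count + 1 else count
      | none => count) 0   -- none unreachable: Python's index is always in range here

-- ===== PORT B =====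
-- run-length encoding loop of Source B: returns the list of run lengths
def rleGo (cur : Char) (ln : Nat) : List Char → List Nat
  | [] => [ln]
  | c :: rest => if c == cur then rleGo cur (ln + 1) rest else ln :: rleGo c 1 rest

-- sum(l - 1 for l in runs)
def runsSum (runs : List Nat) : Int := (runs.map (fun l : Nat => ((l : Int) - 1))).sum

def solution_alt (a : String) : Int :=
  match a.toList with
  | [] => 0
  | x :: rest =>
    runsSum (rleGo x 1 rest)
      + (if (x :: rest).getLast (by simp) == x then 1 else 0)

-- ===== PRECONDITION & SPEC =====
def Spec_solution (a : String) (out : Int) : Prop := out = solution_alt a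
instance (a : String) (out : Int) : Decidable (Spec_solution a out) := by unfold Spec_solution; infer_instance

-- ===== CLAIM (what is proved, stated in full; the proofs are below) =====
def Claim_equal_solution : Prop := ∀ (a : String), Dom_solution a → Spec_solution a (solution a)

-- ===== LEMMAS AND PROOFS =====

-- number of equal adjacent pairs in the linear (non-circular) order
def adj : List Char → Int
  | [] => 0
  | [_] => 0
  | x :: y :: t => (if x == y then 1 else 0) + adj (y :: t)

-- wraparound bonus: 1 if last char equals first char
def wrap (l : List Char) : Int :=
  match l.head?, l.getLast? with
  | some h, some t => if t == h then 1 else 0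
  | _, _ => 0

-- A's loop, abstracted over the suffix being iterated and its start index
def solLoop (l : List Char) (s : List Char) (k : Int) (acc : Int) : Int :=
  (PySem.List.enumerate s k).foldl
    (fun count ic =>
      let next_elem : Option Char :=
        if ic.1 + 1 = (l.length : Int) then PySem.List.pyGet? l 0
        else PySem.List.pyGet? l (ic.1 + 1)
      match next_elem with
      | some ne => if is_same ic.2 ne then count + 1 else count
      | none => count) acc

lemma solution_eq_solLoop (a : String) : solution a = solLoop a.toList a.toList 0 0 := rfl

lemma pyGet?_zero_head (l : List Char) : PySem.List.pyGet? l 0 = l.head? := by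
  cases l with
  | nil => simp [PySem.List.pyGet?, PySem.List.pyIdx?]
  | cons x t => simp [PySem.List.pyGet?, PySem.List.pyIdx?]

lemma is_same_eq (a b : Char) : is_same a b = (a == b) := by
  unfold is_same
  split_ifs with h
  · simp [h]
  · simp [Bool.not_eq_true] at h
    simp [h]

lemma solLoop_nil (l : List Char) (k acc : Int) : solLoop l [] k acc = acc := rfl

lemma solLoop_cons (l : List Char) (c : Char) (s : List Char) (k acc : Int) :
    solLoop l (c :: s) k acc =
      solLoop l s (k + 1)
        (match (if k + 1 = (l.length : Int) then PySem.List.pyGet? l 0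
                else PySem.List.pyGet? l (k + 1)) with
         | some ne => if is_same c ne then acc + 1 else acc
         | none => acc) := by
  simp only [solLoop, PySem.List.enumerate_cons, List.foldl_cons]

lemma solLoop_invariant :
    ∀ (s t : List Char) (acc : Int), s ≠ [] →
      solLoop (t ++ s) s (t.length : Int) acc = acc + adj s + wrap (t ++ s) := by
  intro s
  induction s with
  | nil => intro t acc h; exact absurd rfl h
  | cons c s' ih =>
    intro t acc _
    cases s' with
    | nil =>
      -- last iteration: index t.length, condition t.length + 1 = length holds
      have hcond : ((t.length : Int) + 1 = (((t ++ [c]).length : Nat) : Int)) := by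
        simp
      rw [solLoop_cons, if_pos hcond, pyGet?_zero_head]
      have hne : t ++ [c] ≠ [] := by simp
      have hhead : (t ++ [c]).head? = some ((t ++ [c]).head hne) := by
        simp [List.head?_eq_some_head]
      rw [hhead]
      have hred : (match (some ((t ++ [c]).head hne) : Option Char) with
          | some ne => if is_same c ne then acc + 1 else acc
          | none => acc) = (if is_same c ((t ++ [c]).head hne) then acc + 1 else acc) := rfl
      rw [hred, solLoop_nil]
      have hlast : (t ++ [c]).getLast? = some c := by
        simp [List.getLast?_append]
      simp only [adj, wrap, hhead, hlast, is_same_eq]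
      split_ifs <;> ring
    | cons c' s'' =>
      have hcond : ¬ ((t.length : Int) + 1 = (((t ++ c :: c' :: s'').length : Nat) : Int)) := by
        simp; omega
      have hidx : ((t.length : Int) + 1) = (((t.length + 1 : Nat) : Int)) := by push_cast; ring
      have hget : PySem.List.pyGet? (t ++ c :: c' :: s'') ((t.length : Int) + 1) = some c' := by
        rw [hidx, PySem.List.pyGet?_natCast]
        rw [List.getElem?_append_right (by omega)]
        simp
      rw [solLoop_cons, if_neg hcond, hget]
      have hred : (match (some c' : Option Char) with
          | some ne => if is_same c ne then acc + 1 else acc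
          | none => acc) = (if is_same c c' then acc + 1 else acc) := rfl
      rw [hred]
      have hrec := ih (t ++ [c]) (if is_same c c' then acc + 1 else acc) (by simp)
      have hlen : ((t ++ [c]).length : Int) = (t.length : Int) + 1 := by simp
      rw [hlen] at hrec
      have hassoc : (t ++ [c]) ++ (c' :: s'') = t ++ c :: c' :: s'' := by simp
      rw [hassoc] at hrec
      rw [hrec]
      simp only [adj, is_same_eq]
      split_ifs <;> ring

lemma rleGo_sum (rest : List Char) :
    ∀ (cur : Char) (ln : Nat),
      runsSum (rleGo cur ln rest) = (ln : Int) - 1 + adj (cur :: rest) := by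
  induction rest with
  | nil => intro cur ln; simp [rleGo, runsSum, adj]
  | cons c rest ih =>
    intro cur ln
    by_cases h : (c == cur) = true
    · have hc : c = cur := by simpa using h
      simp only [rleGo, h, if_pos, ih, adj, hc, beq_self_eq_true, if_true]
      push_cast; ring
    · have h2 : (cur == c) = false := by
        simp at h ⊢; exact fun e => h e.symm
      simp only [rleGo, h, if_false, runsSum, List.map_cons, List.sum_cons, adj, h2,
        Bool.false_eq_true]
      have := ih c 1
      simp only [runsSum] at this
      rw [this]
      push_cast; ring

lemma solution_alt_eq (a : String) : solution_alt a = adj a.toList + wrap a.toList := by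
  cases hl : a.toList with
  | nil => simp [solution_alt, hl, adj, wrap]
  | cons x rest =>
    simp only [solution_alt, hl]
    rw [rleGo_sum rest x 1]
    have hw : wrap (x :: rest) =
        (if (x :: rest).getLast (by simp) == x then 1 else 0) := by
      simp [wrap, List.getLast?_eq_getLast]
    rw [hw]; push_cast; ring

-- ===== VERDICT (by name: the statement is the Claim_ definition above) =====
theorem solution_spec : Claim_equal_solution := by
  intro a _
  unfold Spec_solution
  rw [solution_eq_solLoop, solution_alt_eq]
  cases hl : a.toList with
  | nil => simp [solLoop, PySem.List.enumerate_nil, adj, wrap]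
  | cons x rest =>
    have h := solLoop_invariant (x :: rest) [] 0 (by simp)
    simpa using h
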